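-- pv_equiv track=rewrite | github.com/goodmike31/itl2-class-materials | notebooks/7 - Text manipulation/manip10.py | cv
-- ===== SOURCE A (Python) =====
-- def consonant(s,i):
-- 	letter = s[i]
-- 	if letter in 'aeiou':
-- 		return False
-- 	elif letter == 'y' and i == 0:
-- 		return True
-- 	elif letter == 'y' and consonant(s,i-1):
-- 		return False
-- 	else:
-- 		return True
--
-- def cv(w):
-- 	res = ''
-- 	for i in range(len(w)):
-- 		if consonant(w,i):
-- 			res += 'C'
-- 		else:
-- 			res += 'V'
-- 	return res
-- ===== SOURCE B (Python) =====
-- def cv(w):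
--     out = []
--     prev = False  # consonant status of the previous letter ('y' at position 0 counts as consonant)
--     for ch in w:
--         if ch in 'aeiou':
--             c = False
--         elif ch == 'y':
--             c = not prev
--         else:
--             c = True
--         out.append('C' if c else 'V')
--         prev = c
--     return ''.join(out)
-- ===== Notes on version B (the rewrite author's own statement) =====
-- stated objective: faster
-- what changed: Replaces the per-position recursive consonant(s,i) lookup (which walks back through runs of 'y') and quadratic string concatenation by a single left-to-right pass that carries the previous letter's consonant status and joins the labels once.
import Mathlib
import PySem

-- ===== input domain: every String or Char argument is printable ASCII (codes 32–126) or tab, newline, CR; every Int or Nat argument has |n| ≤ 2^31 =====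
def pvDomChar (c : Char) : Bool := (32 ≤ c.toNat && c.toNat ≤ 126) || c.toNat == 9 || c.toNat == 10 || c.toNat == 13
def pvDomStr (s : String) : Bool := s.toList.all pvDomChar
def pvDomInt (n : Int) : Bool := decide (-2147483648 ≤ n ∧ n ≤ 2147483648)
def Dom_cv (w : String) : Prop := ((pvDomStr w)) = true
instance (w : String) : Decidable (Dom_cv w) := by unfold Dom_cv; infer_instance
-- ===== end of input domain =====

-- B replaces A's per-position recursion (re-walking runs of 'y') by one pass carrying the previous consonant status.

-- ===== PORT A =====
-- consonant(s, i): cv only calls it with 0 ≤ i < len(s) and the recursion goes to i - 1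
-- only when i ≠ 0, so every index is in range; getD with a dummy default is exact here.
def consonantA (s : List Char) (i : Nat) : Bool :=
  let letter := s.getD i ' '
  if letter ∈ ['a', 'e', 'i', 'o', 'u'] then false
  else if h0 : letter = 'y' ∧ i = 0 then true
  else if hy : letter = 'y' then
    (if consonantA s (i - 1) then false else true)
  else true
termination_by i
decreasing_by
  have : i ≠ 0 := fun h => h0 ⟨hy, h⟩
  omega

def cv (w : String) : String :=
  String.mk ((List.range w.toList.length).foldl
    (fun res i => res ++ [if consonantA w.toList i then 'C' else 'V']) [])

-- ===== PORT B =====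
def stepB (prev : Bool) (ch : Char) : Bool :=
  if ch ∈ ['a', 'e', 'i', 'o', 'u'] then false
  else if ch = 'y' then !prev
  else true

-- the single pass of Source B: the accumulated labels, and the previous letter's consonant status
def runB (s : List Char) : List Char × Bool :=
  s.foldl
    (fun (acc : List Char × Bool) ch =>
      let c := stepB acc.2 ch
      (acc.1 ++ [if c then 'C' else 'V'], c))
    ([], false)

def cv_alt (w : String) : String :=
  String.mk (runB w.toList).1

-- ===== PRECONDITION & SPEC =====
def Spec_cv (w : String) (out : String) : Prop := out = cv_alt w
instance (w : String) (out : String) : Decidable (Spec_cv w out) := by unfold Spec_cv; infer_instance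

-- ===== CLAIM (what is proved, stated in full; the proofs are below) =====
def Claim_equal_cv : Prop := ∀ (w : String), Dom_cv w → Spec_cv w (cv w)

-- ===== LEMMAS AND PROOFS =====

-- A's recursion unfolded as one step on the previous status.
theorem consonantA_eq_step (s : List Char) (i : Nat) :
    consonantA s i = stepB (if i = 0 then false else consonantA s (i - 1)) (s.getD i ' ') := by
  rw [consonantA]
  unfold stepB
  by_cases hv : s.getD i ' ' ∈ ['a', 'e', 'i', 'o', 'u']
  · rw [if_pos hv, if_pos hv]
  · rw [if_neg hv, if_neg hv]
    by_cases hy : s.getD i ' ' = 'y'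
    · by_cases h0 : i = 0
      · rw [dif_pos ⟨hy, h0⟩, if_pos hy, if_pos h0]; rfl
      · rw [dif_neg (fun h => h0 h.2), dif_pos hy, if_pos hy, if_neg h0]
        cases consonantA s (i - 1) <;> rfl
    · rw [dif_neg (fun h => hy h.1), dif_neg hy, if_neg hy]

-- consonantA only looks at the prefix up to i.
theorem consonantA_append (s t : List Char) (i : Nat) (h : i < s.length) :
    consonantA (s ++ t) i = consonantA s i := by
  induction i using Nat.strong_induction_on with
  | _ i ih =>
    rw [consonantA_eq_step (s ++ t) i, consonantA_eq_step s i]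
    have hget : (s ++ t).getD i ' ' = s.getD i ' ' := by
      rw [List.getD_eq_getElem?_getD, List.getD_eq_getElem?_getD,
        List.getElem?_append_left h]
    rw [hget]
    by_cases h0 : i = 0
    · rw [if_pos h0, if_pos h0]
    · rw [if_neg h0, if_neg h0, ih (i - 1) (by omega) (by omega)]

theorem runB_spec (s : List Char) :
    runB s = ((List.range s.length).map
                (fun i => if consonantA s i then 'C' else 'V'),
              if s.length = 0 then false else consonantA s (s.length - 1)) := by
  induction s using List.reverseRecOn with
  | nil => simp [runB]
  | append_singleton s c ih =>
    unfold runB at ih ⊢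
    rw [List.foldl_append, ih]
    have hlen : (s ++ [c]).length = s.length + 1 := by simp
    have hmap : (List.range (s ++ [c]).length).map
        (fun i => if consonantA (s ++ [c]) i then 'C' else 'V')
        = (List.range s.length).map (fun i => if consonantA s i then 'C' else 'V')
          ++ [if consonantA (s ++ [c]) s.length then 'C' else 'V'] := by
      rw [hlen, List.range_succ, List.map_append, List.map_singleton]
      congr 1
      apply List.map_congr_left
      intro i hi
      rw [consonantA_append s [c] i (List.mem_range.mp hi)]
    have hlast : consonantA (s ++ [c]) s.length
        = stepB (if s.length = 0 then false else consonantA s (s.length - 1)) c := by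
      rw [consonantA_eq_step]
      have hget : (s ++ [c]).getD s.length ' ' = c := by
        rw [List.getD_eq_getElem?_getD, List.getElem?_append_right (le_refl _)]
        simp
      rw [hget]
      by_cases h0 : s.length = 0
      · rw [if_pos h0, if_pos h0]
      · rw [if_neg h0, if_neg h0, consonantA_append s [c] (s.length - 1) (by omega)]
    simp only [List.foldl_cons, List.foldl_nil]
    rw [hmap, hlast, hlen]
    simp only [Nat.succ_ne_zero, if_false, Nat.add_sub_cancel]
    rw [hlast]

theorem cv_eq_map (w : String) :
    cv w = String.mk ((List.range w.toList.length).map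
      (fun i => if consonantA w.toList i then 'C' else 'V')) := by
  unfold cv
  rw [PySem.List.foldl_append_singleton_eq_map]
  simp

-- ===== VERDICT (by name: the statement is the Claim_ definition above) =====
theorem cv_spec : Claim_equal_cv := by
  intro w _
  unfold Spec_cv cv_alt
  rw [cv_eq_map, runB_spec]
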